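-- pv_equiv track=rewrite | github.com/NikolaTsolov/HackBG | Week1/WarmUp/Fib_number.py | fib_number
-- ===== SOURCE A (Python) =====
-- def reverse_list(obj):
-- 	end = len(obj)
-- 	for i in range(0,end//2):
-- 		new_obj = obj[i]
-- 		obj[i] = obj[end-1]
-- 		obj[end-1] = new_obj
-- 		end -= 1
-- 	return obj
--
-- def fibonachi(n):
-- 	if n == 1:
-- 		resault = [1]
-- 	elif n == 2:
-- 		resault = [1,1]
-- 	else:
-- 		resault = [1,1]
-- 		for number in range(0,n-2):
-- 			resault.insert(number+2,resault[number]+resault[number+1])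
-- 	return resault
--
-- def fib_number (n):
-- 	fib = fibonachi(n)
-- 	end = len(fib)
-- 	fib = reverse_list(fib)
-- 	number = 0
--
-- 	for i in range(0,end):
-- 		number += fib[i] * 10 ** i
--
-- 	return number
-- ===== SOURCE B (Python) =====
-- def fib_number(n):
--     # Single forward pass: generate Fibonacci numbers with two registers and
--     # fold them into the answer by Horner accumulation; no list, no reverse,
--     # no power table.
--     if n == 1:
--         return 1
--     number, a, b = 11, 1, 1  # 11 = Horner fold of the seed [1, 1]
--     for _ in range(n - 2):
--         a, b = b, a + b
--         number = number * 10 + b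
--     return number
-- ===== Notes on version B (the rewrite author's own statement) =====
-- stated objective: simpler
-- what changed: Replaces build-list-by-insert, swap-loop reverse and a power-of-ten weighted sum with one forward pass that keeps two Fibonacci registers and folds each number into the result by Horner accumulation; no list, no reverse helper, no power table.
import Mathlib
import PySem

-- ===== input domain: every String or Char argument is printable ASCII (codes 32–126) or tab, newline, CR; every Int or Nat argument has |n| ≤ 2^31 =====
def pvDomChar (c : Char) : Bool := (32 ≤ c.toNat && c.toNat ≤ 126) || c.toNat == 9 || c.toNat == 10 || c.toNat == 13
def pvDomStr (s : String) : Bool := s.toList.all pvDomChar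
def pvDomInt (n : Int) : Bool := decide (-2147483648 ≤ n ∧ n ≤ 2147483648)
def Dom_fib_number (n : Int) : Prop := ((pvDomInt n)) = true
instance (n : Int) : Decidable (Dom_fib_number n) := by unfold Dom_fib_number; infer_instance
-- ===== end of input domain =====

-- B replaces A's build-list / swap-reverse / 10**i weighted sum with one forward
-- Horner-accumulating pass over two Fibonacci registers (objective: simpler).

-- ===== PORT A =====

-- reverse_list: loop state is (obj, end); obj[i] reads/writes are always in
-- range during A's run, so pyGetD/pySetD are exact here.
def pv_reverse_list (obj : List Int) : List Int :=
  let endv : Int := obj.length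
  ((PySem.List.pyRange 0 (PySem.Int.floordiv endv 2) 1).foldl
    (fun (st : List Int × Int) i =>
      let new_obj := PySem.List.pyGetD st.1 i 0
      let obj1 := PySem.List.pySetD st.1 i (PySem.List.pyGetD st.1 (st.2 - 1) 0)
      let obj2 := PySem.List.pySetD obj1 (st.2 - 1) new_obj
      (obj2, st.2 - 1)) (obj, endv)).1

def pv_fibonachi (n : Int) : List Int :=
  if n = 1 then [1]
  else if n = 2 then [1, 1]
  else
    (PySem.List.pyRange 0 (n - 2) 1).foldl
      (fun resault number =>
        PySem.List.insert resault (number + 2)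
          (PySem.List.pyGetD resault number 0 + PySem.List.pyGetD resault (number + 1) 0))
      [1, 1]

def fib_number (n : Int) : Int :=
  let fib := pv_fibonachi n
  let endv : Int := fib.length
  let fib2 := pv_reverse_list fib
  -- 10 ** i ported as 10 ^ i.toNat: exact, since i ranges over 0..end-1 (nonnegative)
  (PySem.List.pyRange 0 endv 1).foldl
    (fun number i => number + PySem.List.pyGetD fib2 i 0 * 10 ^ i.toNat) 0

-- ===== PORT B =====
def fib_number_alt (n : Int) : Int :=
  if n = 1 then 1
  else
    ((PySem.List.pyRange 0 (n - 2) 1).foldl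
      (fun (st : Int × Int × Int) _ =>
        (st.1 * 10 + (st.2.1 + st.2.2), st.2.2, st.2.1 + st.2.2))
      (11, 1, 1)).1

-- ===== PRECONDITION & SPEC =====
def Spec_fib_number (n : Int) (out : Int) : Prop := out = fib_number_alt n
instance (n : Int) (out : Int) : Decidable (Spec_fib_number n out) := by unfold Spec_fib_number; infer_instance

-- ===== CLAIM (what is proved, stated in full; the proofs are below) =====
def Claim_equal_fib_number : Prop := ∀ (n : Int), Dom_fib_number n → Spec_fib_number n (fib_number n)

-- ===== LEMMAS AND PROOFS =====

-- Fibonacci registers (a, b) after k steps, and the list A's loop builds.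
def fibAux : Nat → Int × Int
  | 0 => (1, 1)
  | k + 1 => ((fibAux k).2, (fibAux k).1 + (fibAux k).2)

def fibList : Nat → List Int
  | 0 => [1, 1]
  | k + 1 => fibList k ++ [(fibAux k).1 + (fibAux k).2]

def horner (l : List Int) : Int := l.foldl (fun acc f => acc * 10 + f) 0

theorem length_fibList (k : Nat) : (fibList k).length = k + 2 := by
  induction k with
  | zero => rfl
  | succ k ih => simp [fibList, ih]

theorem getD_fibList (k : Nat) :
    (fibList k).getD k 0 = (fibAux k).1 ∧ (fibList k).getD (k + 1) 0 = (fibAux k).2 := by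
  induction k with
  | zero => constructor <;> rfl
  | succ k ih =>
    have hlen := length_fibList k
    constructor
    · show (fibList k ++ [(fibAux k).1 + (fibAux k).2]).getD (k + 1) 0 = (fibAux k).2
      rw [List.getD_eq_getElem?_getD, List.getElem?_append_left (by omega),
        ← List.getD_eq_getElem?_getD, ih.2]
    · show (fibList k ++ [(fibAux k).1 + (fibAux k).2]).getD (k + 2) 0 = (fibAux k).1 + (fibAux k).2
      rw [List.getD_eq_getElem?_getD, List.getElem?_append_right (by omega)]
      simp [hlen]

-- A's fibonachi loop builds fibList m
theorem fib_fold_eq (m : Nat) :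
    (PySem.List.pyRange 0 (m : Int) 1).foldl
      (fun resault number =>
        PySem.List.insert resault (number + 2)
          (PySem.List.pyGetD resault number 0 + PySem.List.pyGetD resault (number + 1) 0))
      [1, 1] = fibList m := by
  induction m with
  | zero => rfl
  | succ m ih =>
    have h : ((m + 1 : Nat) : Int) = (m : Int) + 1 := by push_cast; ring
    rw [h, PySem.List.pyRange_one_succ_right (by positivity), List.foldl_append, ih]
    simp only [List.foldl_cons, List.foldl_nil, PySem.List.pyGetD_natCast]
    have h2 : (m : Int) + 2 = (((fibList m).length : Nat) : Int) := by
      rw [length_fibList]; push_cast; ring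
    rw [(getD_fibList m).1]
    have h3 : (fibList m).getD (m + 1) 0 = (fibAux m).2 := (getD_fibList m).2
    rw [show ((m : Int) + 1) = ((m + 1 : Nat) : Int) by push_cast; ring]
    rw [PySem.List.pyGetD_natCast, h3, h2,
      PySem.List.insert_natCast _ _ _ (le_refl _)]
    simp [fibList]

-- the swap loop reverses
def swapFold (l : List Int) (k : Nat) : List Int × Int :=
  (PySem.List.pyRange 0 (k : Int) 1).foldl
    (fun (st : List Int × Int) i =>
      let new_obj := PySem.List.pyGetD st.1 i 0
      let obj1 := PySem.List.pySetD st.1 i (PySem.List.pyGetD st.1 (st.2 - 1) 0)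
      let obj2 := PySem.List.pySetD obj1 (st.2 - 1) new_obj
      (obj2, st.2 - 1)) (l, (l.length : Int))

theorem getD_set_int (L : List Int) (i j : Nat) (v : Int) :
    (L.set i v).getD j 0 = if i = j ∧ i < L.length then v else L.getD j 0 := by
  rw [List.getD_eq_getElem?_getD, List.getElem?_set, List.getD_eq_getElem?_getD]
  by_cases h : i = j
  · subst h
    by_cases hlen : i < L.length
    · simp [hlen]
    · have hnone : L[i]? = none := by rw [List.getElem?_eq_none_iff]; omega
      simp [hlen]
  · simp [h]

theorem swapFold_inv (l : List Int) (k : Nat) (hk : k ≤ l.length / 2) :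
    (swapFold l k).2 = (l.length : Int) - k ∧
    (swapFold l k).1.length = l.length ∧
    (∀ j : Nat, j < l.length →
      (swapFold l k).1.getD j 0 =
        if j < k ∨ l.length - k ≤ j then l.getD (l.length - 1 - j) 0 else l.getD j 0) := by
  induction k with
  | zero =>
    have h0 : swapFold l 0 = (l, (l.length : Int)) := by
      unfold swapFold
      rw [show ((0 : Nat) : Int) = 0 from rfl, PySem.List.pyRange_one_eq_nil le_rfl]
      rfl
    refine ⟨by rw [h0]; simp, by rw [h0], ?_⟩
    intro j hj
    rw [h0, if_neg (by omega)]
  | succ k ih =>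
    have hk' : k ≤ l.length / 2 := by omega
    have hlen2 : 2 * (k + 1) ≤ l.length := by omega
    obtain ⟨ih2, ihlen, ihget⟩ := ih hk'
    have hstep : swapFold l (k + 1) =
        (fun (st : List Int × Int) i =>
          let new_obj := PySem.List.pyGetD st.1 i 0
          let obj1 := PySem.List.pySetD st.1 i (PySem.List.pyGetD st.1 (st.2 - 1) 0)
          let obj2 := PySem.List.pySetD obj1 (st.2 - 1) new_obj
          (obj2, st.2 - 1)) (swapFold l k) (k : Int) := by
      unfold swapFold
      rw [show ((k + 1 : Nat) : Int) = (k : Int) + 1 by push_cast; ring,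
        PySem.List.pyRange_one_succ_right (by positivity), List.foldl_append]
      rfl
    set st := swapFold l k with hst
    have hcast : st.2 - 1 = ((l.length - k - 1 : Nat) : Int) := by
      rw [ih2]; omega
    have hread_k : st.1.getD k 0 = l.getD k 0 := by
      rw [ihget k (by omega), if_neg (by omega)]
    have hread_e : st.1.getD (l.length - k - 1) 0 = l.getD (l.length - 1 - k) 0 := by
      rw [ihget (l.length - k - 1) (by omega), if_neg (by omega)]
      congr 1
      omega
    rw [hstep]
    simp only [hcast, PySem.List.pySetD_natCast, PySem.List.pyGetD_natCast, hread_k, hread_e]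
    refine ⟨by push_cast; omega, by simp [ihlen], ?_⟩
    intro j hj
    rw [getD_set_int, getD_set_int, ihget j hj]
    simp only [List.length_set, ihlen]
    split_ifs <;> first | (congr 1; omega) | omega

theorem reverse_list_eq (l : List Int) : pv_reverse_list l = l.reverse := by
  have hdiv : PySem.Int.floordiv (l.length : Int) 2 = ((l.length / 2 : Nat) : Int) := by
    exact_mod_cast PySem.Int.floordiv_natCast l.length 2
  have heq : pv_reverse_list l = (swapFold l (l.length / 2)).1 := by
    simp only [pv_reverse_list, swapFold, hdiv]
  rw [heq]
  obtain ⟨-, hlen, hget⟩ := swapFold_inv l (l.length / 2) (le_refl _)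
  apply List.ext_getElem
  · simp [hlen]
  · intro j hj1 hj2
    have hj : j < l.length := by simpa [hlen] using hj1
    have h1 : (swapFold l (l.length / 2)).1.getD j 0 = l.getD (l.length - 1 - j) 0 := by
      rw [hget j hj]
      by_cases h : j < l.length / 2 ∨ l.length - l.length / 2 ≤ j
      · rw [if_pos h]
      · rw [if_neg h]
        congr 1
        omega
    have h2 : l.reverse.getD j 0 = l.getD (l.length - 1 - j) 0 := by
      rw [List.getD_eq_getElem?_getD, List.getElem?_reverse hj, List.getD_eq_getElem?_getD]
    have e1 : (swapFold l (l.length / 2)).1[j] = (swapFold l (l.length / 2)).1.getD j 0 :=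
      (List.getD_eq_getElem _ 0 hj1).symm
    have e2 : l.reverse[j] = l.reverse.getD j 0 := (List.getD_eq_getElem _ 0 hj2).symm
    rw [e1, e2, h1, h2]

-- the weighted sum over the reversed list is the Horner fold
theorem weighted_sum_eq (l : List Int) :
    (PySem.List.pyRange 0 (l.length : Int) 1).foldl
      (fun number i => number + PySem.List.pyGetD l.reverse i 0 * 10 ^ i.toNat) 0
      = horner l := by
  have hfold : ∀ (L : List Int) (g : Int → Int) (init : Int),
      L.foldl (fun acc i => acc + g i) init = init + (L.map g).sum := by
    intro L g
    induction L with
    | nil => simp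
    | cons x xs ih => intro init; simp [ih, add_assoc]
  rw [hfold]
  rw [show (PySem.List.pyRange 0 (l.length : Int) 1).map
        (fun i => PySem.List.pyGetD l.reverse i 0 * 10 ^ i.toNat)
      = (List.range l.length).map (fun k => l.reverse.getD k 0 * 10 ^ k) by
    rw [PySem.List.pyRange_one, List.map_map]
    simp]
  rw [zero_add]
  induction l using List.reverseRecOn with
  | nil => simp [horner]
  | append_singleton l x ih =>
    have hrev : (l ++ [x]).reverse = x :: l.reverse := by simp
    rw [hrev, List.length_append, List.length_singleton, List.range_succ_eq_map,
      List.map_cons, List.map_map]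
    have hmap : ∀ k : Nat, ((x :: l.reverse).getD (Nat.succ k) 0 * 10 ^ (Nat.succ k))
        = (l.reverse.getD k 0 * 10 ^ k) * 10 := by
      intro k; rw [List.getD_cons_succ, pow_succ]; ring
    simp only [Function.comp_def]
    rw [List.sum_cons, show ((x :: l.reverse).getD 0 0 * 10 ^ 0) = x by simp]
    calc x + (List.map (fun k => (x :: l.reverse).getD (Nat.succ k) 0 * 10 ^ Nat.succ k) (List.range l.length)).sum
        = x + (List.map (fun k => (l.reverse.getD k 0 * 10 ^ k) * 10) (List.range l.length)).sum := by
          congr 1; apply congrArg; apply List.map_congr_left; intro k _; exact hmap k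
      _ = x + (List.map (fun k => l.reverse.getD k 0 * 10 ^ k) (List.range l.length)).sum * 10 := by
          rw [← List.sum_map_mul_right]
      _ = horner (l ++ [x]) := by rw [ih]; simp [horner, List.foldl_append]; ring

-- B's loop computes (horner (fibList m), fibAux m)
theorem alt_fold_eq (m : Nat) :
    (PySem.List.pyRange 0 (m : Int) 1).foldl
      (fun (st : Int × Int × Int) _ =>
        (st.1 * 10 + (st.2.1 + st.2.2), st.2.2, st.2.1 + st.2.2))
      (11, 1, 1) = (horner (fibList m), fibAux m) := by
  induction m with
  | zero => rfl
  | succ m ih =>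
    have h : ((m + 1 : Nat) : Int) = (m : Int) + 1 := by push_cast; ring
    rw [h, PySem.List.pyRange_one_succ_right (by positivity), List.foldl_append, ih]
    simp [horner, fibList, fibAux, List.foldl_append]

theorem pyRange_toNat (a : Int) :
    PySem.List.pyRange 0 a 1 = PySem.List.pyRange 0 ((a.toNat : Nat) : Int) 1 := by
  by_cases h : 0 ≤ a
  · rw [Int.toNat_of_nonneg h]
  · rw [PySem.List.pyRange_one_eq_nil (by omega), PySem.List.pyRange_one_eq_nil (by omega)]

-- ===== VERDICT (by name: the statement is the Claim_ definition above) =====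
theorem fib_number_spec : Claim_equal_fib_number := by
  intro n _
  unfold Spec_fib_number
  by_cases h1 : n = 1
  · subst h1; decide
  · have hfib : pv_fibonachi n = fibList (n - 2).toNat := by
      unfold pv_fibonachi
      rw [if_neg h1]
      by_cases h2 : n = 2
      · subst h2; norm_num [fibList]
      · rw [if_neg h2, pyRange_toNat, fib_fold_eq]
    unfold fib_number fib_number_alt
    rw [if_neg h1, pyRange_toNat, alt_fold_eq]
    simp only [hfib, reverse_list_eq]
    rw [weighted_sum_eq]
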